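-- pv_equiv track=rewrite | github.com/treejw/python-for-coding-test | baekjoon/10026.py | solution
-- ===== SOURCE A (Python) =====
-- def solution(n, board):
--     move = [(-1,0),(1,0),(0,-1),(0,1)]
--
--     def dfs(item, r, c, flag=False):
--         for dx, dy in move:
--             nr, nc = r+dx, c+dy
--             if 0<=nr<n and 0<=nc<n and board[nr][nc]==item:
--                 if not flag:
--                     board[nr][nc] = 1 if board[nr][nc] == 'B' else 2
--                 else:
--                     board[nr][nc] = 0
--                 dfs(item, nr, nc, flag)
--     cnt_x = 0
--     for r in range(n):
--         for c in range(n):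
--             if type(board[r][c]) == str:
--                 item = board[r][c]
--                 board[r][c] = 1 if board[r][c] == 'B' else 2
--                 dfs(item, r,c)
--                 cnt_x += 1
--     cnt_o = 0
--     for r in range(n):
--         for c in range(n):
--             if board[r][c] != 0:
--                 item = board[r][c]
--                 board[r][c] = 0
--                 dfs(item, r,c, flag=True)
--                 cnt_o += 1
--     return cnt_x, cnt_o
-- ===== SOURCE B (Python) =====
-- def solution(n, board):
--     # Iterative (explicit-stack) flood fill instead of A's recursive dfs;
--     # mutates board in place to all zeros exactly like A.
--     def fill(sr, sc, item, newval):
--         stack = [(sr, sc)]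
--         while stack:
--             r, c = stack.pop()
--             for nr, nc in ((r - 1, c), (r + 1, c), (r, c - 1), (r, c + 1)):
--                 if 0 <= nr < n and 0 <= nc < n and board[nr][nc] == item:
--                     board[nr][nc] = newval
--                     stack.append((nr, nc))
--     cnt_x = 0
--     for r in range(n):
--         for c in range(n):
--             cell = board[r][c]
--             if isinstance(cell, str):
--                 newval = 1 if cell == 'B' else 2
--                 board[r][c] = newval
--                 fill(r, c, cell, newval)
--                 cnt_x += 1
--     cnt_o = 0
--     for r in range(n):
--         for c in range(n):
--             cell = board[r][c]
--             if cell != 0: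
--                 board[r][c] = 0
--                 fill(r, c, cell, 0)
--                 cnt_o += 1
--     return cnt_x, cnt_o
-- ===== Notes on version B (the rewrite author's own statement) =====
-- stated objective: alternative
-- what changed: A's recursive dfs flood fill is replaced by an iterative explicit-stack flood fill (pop a cell, recolor and push each in-bounds matching neighbor), keeping the same two-phase scan and the same in-place board mutation.
import Mathlib
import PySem

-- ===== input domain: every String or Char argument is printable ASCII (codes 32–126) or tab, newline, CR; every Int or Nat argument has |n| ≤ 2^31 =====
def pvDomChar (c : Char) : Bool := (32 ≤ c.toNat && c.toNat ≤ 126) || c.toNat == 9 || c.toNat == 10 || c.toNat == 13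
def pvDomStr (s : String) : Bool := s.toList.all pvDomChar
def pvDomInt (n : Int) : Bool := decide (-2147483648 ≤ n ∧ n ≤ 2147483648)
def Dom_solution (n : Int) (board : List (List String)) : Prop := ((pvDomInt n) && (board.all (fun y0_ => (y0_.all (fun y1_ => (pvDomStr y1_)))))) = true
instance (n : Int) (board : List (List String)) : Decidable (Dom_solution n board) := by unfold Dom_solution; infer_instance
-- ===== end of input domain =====

-- B replaces A's recursive dfs flood fill by an explicit-stack iterative flood fill
-- (same two-phase scan, same in-place recoloring; the return value is proved equal).


-- Shared board model: a Python board cell is either a string or an int.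
inductive Cell where
  | s (v : String)
  | i (v : Int)
deriving DecidableEq, Repr

abbrev Board := List (List Cell)

def toCells (board : List (List String)) : Board := board.map (fun row => row.map Cell.s)

-- board[r][c]; every access in both ports sits behind the 0 ≤ · < n guards, so the
-- default is never returned on inputs admitted by Pre_.
def getCell (b : Board) (r c : Int) : Cell :=
  if 0 ≤ r ∧ 0 ≤ c then (b.getD r.toNat []).getD c.toNat (Cell.i (-1)) else Cell.i (-1)

-- board[r][c] = v (in-place assignment)
def setCell (b : Board) (r c : Int) (v : Cell) : Board :=
  b.modify r.toNat (fun row => row.set c.toNat v)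

def isStr : Cell → Bool
  | .s _ => true
  | .i _ => false

-- ===== PORT A =====
def movesA : List (Int × Int) := [(-1, 0), (1, 0), (0, -1), (0, 1)]

-- A's recursive dfs; the fuel n*n+1 bounds the recursion depth (each nested call
-- happens right after one more matching cell was recolored, so depth ≤ n*n + 1).
def dfsA (n : Int) (item : Cell) (flag : Bool) : Nat → Int → Int → Board → Board
  | 0, _, _, b => b
  | fuel + 1, r, c, b =>
    movesA.foldl (fun bb d =>
      let nr := r + d.1
      let nc := c + d.2
      if 0 ≤ nr ∧ nr < n ∧ 0 ≤ nc ∧ nc < n ∧ getCell bb nr nc = item then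
        dfsA n item flag fuel nr nc
          (setCell bb nr nc
            (if flag then Cell.i 0
             else if getCell bb nr nc = Cell.s "B" then Cell.i 1 else Cell.i 2))
      else bb) b

def solution (n : Int) (board : List (List String)) : Int × Int :=
  let fuel := n.toNat * n.toNat + 1
  let s1 := (PySem.List.pyRange 0 n 1).foldl (fun st r =>
    (PySem.List.pyRange 0 n 1).foldl (fun (st : Board × Int) c =>
      let cell := getCell st.1 r c
      if isStr cell then
        (dfsA n cell false fuel r c
          (setCell st.1 r c (if cell = Cell.s "B" then Cell.i 1 else Cell.i 2)), st.2 + 1)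
      else st) st) (toCells board, (0 : Int))
  let s2 := (PySem.List.pyRange 0 n 1).foldl (fun st r =>
    (PySem.List.pyRange 0 n 1).foldl (fun (st : Board × Int) c =>
      let cell := getCell st.1 r c
      if cell ≠ Cell.i 0 then
        (dfsA n cell true fuel r c (setCell st.1 r c (Cell.i 0)), st.2 + 1)
      else st) st) (s1.1, (0 : Int))
  (s1.2, s2.2)

-- ===== PORT B =====
-- B's iterative flood fill: pop a cell, recolor and push each in-bounds matching
-- neighbor.  The fuel bounds the number of loop iterations (≤ 1 + #recolored cells).
def fillB (n : Int) (item nv : Cell) : Nat → List (Int × Int) → Board → Board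
  | _, [], b => b
  | 0, _ :: _, b => b
  | fuel + 1, (r, c) :: st, b =>
    let s' := [(r - 1, c), (r + 1, c), (r, c - 1), (r, c + 1)].foldl
      (fun (s : Board × List (Int × Int)) q =>
        if 0 ≤ q.1 ∧ q.1 < n ∧ 0 ≤ q.2 ∧ q.2 < n ∧ getCell s.1 q.1 q.2 = item then
          (setCell s.1 q.1 q.2 nv, q :: s.2)
        else s) (b, st)
    fillB n item nv fuel s'.2 s'.1

def solution_alt (n : Int) (board : List (List String)) : Int × Int :=
  let fuel := n.toNat * n.toNat + 2
  let s1 := (PySem.List.pyRange 0 n 1).foldl (fun st r =>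
    (PySem.List.pyRange 0 n 1).foldl (fun (st : Board × Int) c =>
      let cell := getCell st.1 r c
      if isStr cell then
        let nv := if cell = Cell.s "B" then Cell.i 1 else Cell.i 2
        (fillB n cell nv fuel [(r, c)] (setCell st.1 r c nv), st.2 + 1)
      else st) st) (toCells board, (0 : Int))
  let s2 := (PySem.List.pyRange 0 n 1).foldl (fun st r =>
    (PySem.List.pyRange 0 n 1).foldl (fun (st : Board × Int) c =>
      let cell := getCell st.1 r c
      if cell ≠ Cell.i 0 then
        (fillB n cell (Cell.i 0) fuel [(r, c)] (setCell st.1 r c (Cell.i 0)), st.2 + 1)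
      else st) st) (s1.1, (0 : Int))
  (s1.2, s2.2)

-- ===== PRECONDITION & SPEC =====
-- Pre_ excludes exactly the inputs on which Python A raises IndexError:
-- n > 0 but the board (or one of its first n rows) has fewer than n entries.
def Pre_solution (n : Int) (board : List (List String)) : Prop :=
  0 < n → (n ≤ board.length ∧ ∀ row ∈ board.take n.toNat, n ≤ row.length)
instance (n : Int) (board : List (List String)) : Decidable (Pre_solution n board) := by
  unfold Pre_solution; infer_instance

def pvWitness_solution : Int × List (List String) :=
  (2, [["B", "B"], ["R", "B"]])

def Spec_solution (n : Int) (board : List (List String)) (out : Int × Int) : Prop := out = solution_alt n board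
instance (n : Int) (board : List (List String)) (out : Int × Int) : Decidable (Spec_solution n board out) := by unfold Spec_solution; infer_instance

-- ===== CLAIM (what is proved, stated in full; the proofs are below) =====
def Claim_equal_solution : Prop := ∀ (n : Int) (board : List (List String)), Dom_solution n board → Pre_solution n board → Spec_solution n board (solution n board)

-- ===== LEMMAS AND PROOFS =====

-- specification vocabulary ------------------------------------------------

-- one flood-fill step: q is an in-bounds neighbor of p whose cell equals item
def stepR (n : Int) (b : Board) (item : Cell) (p q : Int × Int) : Prop :=
  (q = (p.1 - 1, p.2) ∨ q = (p.1 + 1, p.2) ∨ q = (p.1, p.2 - 1) ∨ q = (p.1, p.2 + 1)) ∧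
  (0 ≤ q.1 ∧ q.1 < n ∧ 0 ≤ q.2 ∧ q.2 < n) ∧ getCell b q.1 q.2 = item

def Reach (n : Int) (b : Board) (item : Cell) : (Int × Int) → (Int × Int) → Prop :=
  Relation.ReflTransGen (stepR n b item)

-- b' has the same row/column structure as b
def DimsEq (b b' : Board) : Prop :=
  b'.length = b.length ∧
  ∀ (i : Nat) (h : i < b.length) (h' : i < b'.length), b'[i].length = b[i].length

-- the n×n window fits inside the actual board
def Shape (n : Int) (b : Board) : Prop :=
  n.toNat ≤ b.length ∧ ∀ (i : Nat), i < n.toNat → ∀ (h : i < b.length), n.toNat ≤ b[i].length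

-- out is b with exactly the cells in P repainted to nv
def PaintedOn (b out : Board) (nv : Cell) (P : Int × Int → Prop) : Prop :=
  (∀ q : Int × Int, P q → getCell out q.1 q.2 = nv) ∧
  (∀ q : Int × Int, ¬ P q → getCell out q.1 q.2 = getCell b q.1 q.2)

def winL (n : Int) : List (Int × Int) :=
  (PySem.List.pyRange 0 n 1).flatMap (fun i => (PySem.List.pyRange 0 n 1).map (fun j => (i, j)))

def matchF (n : Int) (b : Board) (item : Cell) : Finset (Int × Int) :=
  (winL n).toFinset.filter (fun p => getCell b p.1 p.2 = item)

def nvOf (flag : Bool) (item : Cell) : Cell :=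
  if flag then Cell.i 0 else if item = Cell.s "B" then Cell.i 1 else Cell.i 2

-- basic lemmas -------------------------------------------------------------

theorem dimsEq_refl (b : Board) : DimsEq b b := ⟨rfl, fun _ _ _ => rfl⟩

theorem dimsEq_trans {a b c : Board} (h1 : DimsEq a b) (h2 : DimsEq b c) : DimsEq a c := by
  obtain ⟨l1, r1⟩ := h1; obtain ⟨l2, r2⟩ := h2
  exact ⟨l2.trans l1, fun i h h' => (r2 i (l1 ▸ h) h').trans (r1 i h (l1 ▸ h))⟩

theorem shape_of_dimsEq {n : Int} {b b' : Board} (hs : Shape n b) (hd : DimsEq b b') :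
    Shape n b' := by
  obtain ⟨hl, hr⟩ := hs; obtain ⟨dl, dr⟩ := hd
  refine ⟨dl ▸ hl, fun i hi h' => ?_⟩
  have h : i < b.length := dl ▸ h'
  exact (dr i h h') ▸ hr i hi h

theorem dims_setCell (b : Board) (r c : Int) (v : Cell) : DimsEq b (setCell b r c v) := by
  constructor
  · simp [setCell]
  · intro i h h'
    simp only [setCell]
    rw [List.getElem_modify]
    split <;> simp

theorem getCell_setCell (b : Board) (r c : Int) (v : Cell)
    (hr : 0 ≤ r) (hc : 0 ≤ c) (hrl : r.toNat < b.length)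
    (hcl : c.toNat < (b[r.toNat]'hrl).length) (x y : Int) :
    getCell (setCell b r c v) x y = if x = r ∧ y = c then v else getCell b x y := by
  have hrowmod : ∀ i : Nat,
      (List.modify b r.toNat (fun row => row.set c.toNat v)).getD i [] =
      if r.toNat = i then (b.getD i []).set c.toNat v else b.getD i [] := by
    intro i
    rw [List.getD_eq_getElem?_getD (l := List.modify b r.toNat fun row => row.set c.toNat v),
      List.getElem?_modify]
    rw [List.getD_eq_getElem?_getD (l := b)]
    by_cases h : r.toNat = i
    · cases b[i]? with
      | none => simp [h]
      | some row => simp [h]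
    · cases b[i]? with
      | none => simp [h]
      | some row => simp [h]
  unfold getCell setCell
  by_cases hg : 0 ≤ x ∧ 0 ≤ y
  · rw [if_pos hg, hrowmod x.toNat]
    by_cases hx : x = r
    · subst hx
      rw [if_pos rfl]
      by_cases hy : y = c
      · subst hy
        rw [if_pos ⟨rfl, rfl⟩]
        have hlt : y.toNat < (b.getD x.toNat []).length := by
          rw [List.getD_eq_getElem (hn := hrl)]; exact hcl
        rw [List.getD_eq_getElem?_getD (l := b)] at hlt
        simp [List.getD_eq_getElem?_getD, List.getElem?_set_self, hlt]
      · have h1 : c.toNat ≠ y.toNat := by omega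
        rw [List.getD_eq_getElem?_getD, List.getElem?_set_ne h1,
          if_neg (show ¬(x = x ∧ y = c) from fun h => hy h.2), if_pos hg,
          List.getD_eq_getElem?_getD (l := b.getD x.toNat [])]
    · have h1 : r.toNat ≠ x.toNat := by omega
      rw [if_neg h1, if_neg (show ¬(x = r ∧ y = c) from fun h => hx h.1), if_pos hg]
  · rw [if_neg hg,
      if_neg (show ¬(x = r ∧ y = c) from fun h => hg ⟨h.1 ▸ hr, h.2 ▸ hc⟩), if_neg hg]

theorem getCell_eq_getElem (b : Board) (i j : Nat) (h1 : i < b.length)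
    (h2 : j < (b[i]'h1).length) :
    getCell b (i : Int) (j : Int) = (b[i]'h1)[j]'h2 := by
  unfold getCell
  rw [if_pos ⟨Int.natCast_nonneg i, Int.natCast_nonneg j⟩]
  simp only [Int.toNat_natCast]
  rw [List.getD_eq_getElem (hn := h1), List.getD_eq_getElem (hn := h2)]

theorem mem_winL {n : Int} {p : Int × Int} :
    p ∈ winL n ↔ (0 ≤ p.1 ∧ p.1 < n ∧ 0 ≤ p.2 ∧ p.2 < n) := by
  unfold winL
  rw [List.mem_flatMap]
  constructor
  · rintro ⟨i, hi, hmem⟩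
    rw [PySem.List.mem_pyRange_one] at hi
    rw [List.mem_map] at hmem
    obtain ⟨j, hj, rfl⟩ := hmem
    rw [PySem.List.mem_pyRange_one] at hj
    exact ⟨hi.1, hi.2, hj.1, hj.2⟩
  · rintro ⟨h1, h2, h3, h4⟩
    refine ⟨p.1, ?_, ?_⟩
    · rw [PySem.List.mem_pyRange_one]; exact ⟨h1, h2⟩
    · rw [List.mem_map]
      exact ⟨p.2, by rw [PySem.List.mem_pyRange_one]; exact ⟨h3, h4⟩, rfl⟩

theorem mem_matchF {n : Int} {b : Board} {item : Cell} {p : Int × Int} :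
    p ∈ matchF n b item ↔
      ((0 ≤ p.1 ∧ p.1 < n ∧ 0 ≤ p.2 ∧ p.2 < n) ∧ getCell b p.1 p.2 = item) := by
  simp only [matchF, Finset.mem_filter, List.mem_toFinset, mem_winL]

theorem length_winL (n : Int) : (winL n).length = n.toNat * n.toNat := by
  rw [winL, List.length_flatMap]
  have hmapeq : ((PySem.List.pyRange 0 n 1).map
      (fun i => ((PySem.List.pyRange 0 n 1).map (fun j => (i, j))).length)) =
      (PySem.List.pyRange 0 n 1).map (fun _ => n.toNat) := by
    apply List.map_congr_left
    intro i _
    rw [List.length_map, PySem.List.length_pyRange_one]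
    simp
  rw [hmapeq, List.map_const', List.sum_replicate, smul_eq_mul,
    PySem.List.length_pyRange_one]
  simp [Nat.mul_comm]

theorem card_matchF_le (n : Int) (b : Board) (item : Cell) :
    (matchF n b item).card ≤ n.toNat * n.toNat := by
  calc (matchF n b item).card
      ≤ (winL n).toFinset.card := Finset.card_filter_le _ _
    _ ≤ (winL n).length := List.toFinset_card_le _
    _ = n.toNat * n.toNat := length_winL n

theorem stepR_mono {n : Int} {bA bB : Board} {item : Cell}
    (h : ∀ q : Int × Int, getCell bB q.1 q.2 = item → getCell bA q.1 q.2 = item)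
    {x y : Int × Int} (hs : stepR n bB item x y) : stepR n bA item x y :=
  ⟨hs.1, hs.2.1, h y hs.2.2⟩

theorem reach_mono {n : Int} {bA bB : Board} {item : Cell}
    (h : ∀ q : Int × Int, getCell bB q.1 q.2 = item → getCell bA q.1 q.2 = item)
    {x y : Int × Int} (hr : Reach n bB item x y) : Reach n bA item x y :=
  Relation.ReflTransGen.mono (fun _ _ hs => stepR_mono h hs) hr

-- path decomposition: a reach-chain in b either ends in the painted set Q,
-- or survives in the painted board b₂, starting from x or from some element of Q.
theorem pathLemma (n : Int) (item : Cell) (b b₂ : Board) (Q : List (Int × Int))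
    (h1 : ∀ y ∈ Q, getCell b₂ y.1 y.2 ≠ item)
    (h2 : ∀ y : Int × Int, y ∉ Q → getCell b₂ y.1 y.2 = getCell b y.1 y.2)
    (x q : Int × Int) (hre : Reach n b item x q) :
    getCell b q.1 q.2 = item →
    q ∈ Q ∨ (getCell b₂ q.1 q.2 = item ∧
      ∃ s', (s' = x ∨ s' ∈ Q) ∧ Relation.ReflTransGen (stepR n b₂ item) s' q) := by
  have hre' : Relation.ReflTransGen (stepR n b item) x q := hre
  clear hre
  induction hre' with
  | refl =>
    intro hq
    by_cases hQ : x ∈ Q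
    · exact Or.inl hQ
    · exact Or.inr ⟨(h2 x hQ).trans hq, x, Or.inl rfl, Relation.ReflTransGen.refl⟩
  | @tail y q' hxy hyz ih =>
    intro hq
    by_cases hQ : q' ∈ Q
    · exact Or.inl hQ
    · have hb2 : getCell b₂ q'.1 q'.2 = item := (h2 q' hQ).trans hq
      have hstep2 : stepR n b₂ item y q' := ⟨hyz.1, hyz.2.1, hb2⟩
      by_cases hyQ : y ∈ Q
      · exact Or.inr ⟨hb2, y, Or.inr hyQ, Relation.ReflTransGen.single hstep2⟩
      · rcases Relation.ReflTransGen.cases_tail hxy with heq | ⟨z, _, hz2⟩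
        · subst heq
          exact Or.inr ⟨hb2, y, Or.inl rfl, Relation.ReflTransGen.single hstep2⟩
        · rcases ih hz2.2.2 with hyQ' | ⟨_, s', hs', hr2⟩
          · exact absurd hyQ' hyQ
          · exact Or.inr ⟨hb2, s', hs', hr2.tail hstep2⟩

-- the DFS invariant --------------------------------------------------------

def InvA (n : Int) (b b' : Board) (item nv : Cell) (p : Int × Int)
    (T : Int × Int → Prop) : Prop :=
  DimsEq b b' ∧
  (∀ q, T q → getCell b q.1 q.2 = item ∧ Reach n b item p q) ∧
  (∀ q, T q → getCell b' q.1 q.2 = nv) ∧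
  (∀ q, ¬ T q → getCell b' q.1 q.2 = getCell b q.1 q.2) ∧
  (∀ x y, T x → stepR n b item x y → T y)

theorem matchF_subset_of_invA {n : Int} {b b' : Board} {item nv : Cell} {p : Int × Int}
    {T : Int × Int → Prop} (hne : nv ≠ item) (hI : InvA n b b' item nv p T) :
    matchF n b' item ⊆ matchF n b item := by
  intro q hq
  rw [mem_matchF] at *
  obtain ⟨hin, hv⟩ := hq
  refine ⟨hin, ?_⟩
  by_cases hT : T q
  · rw [hI.2.2.1 q hT] at hv; exact absurd hv hne
  · rw [← hI.2.2.2.1 q hT]; exact hv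

-- one fold step of A's dfs body
def stepBodyA (n : Int) (item : Cell) (flag : Bool) (fuel : Nat) (r c : Int)
    (bb : Board) (d : Int × Int) : Board :=
  let nr := r + d.1
  let nc := c + d.2
  if 0 ≤ nr ∧ nr < n ∧ 0 ≤ nc ∧ nc < n ∧ getCell bb nr nc = item then
    dfsA n item flag fuel nr nc
      (setCell bb nr nc
        (if flag then Cell.i 0
         else if getCell bb nr nc = Cell.s "B" then Cell.i 1 else Cell.i 2))
  else bb

theorem stepA_aux (n : Int) (item : Cell) (flag : Bool) (hne : nvOf flag item ≠ item)
    (fuel : Nat)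
    (ih : ∀ (b : Board) (p : Int × Int), Shape n b → (matchF n b item).card ≤ fuel →
      getCell b p.1 p.2 ≠ item →
      DimsEq b (dfsA n item flag fuel p.1 p.2 b) ∧
      PaintedOn b (dfsA n item flag fuel p.1 p.2 b) (nvOf flag item)
        (fun q => getCell b q.1 q.2 = item ∧ Reach n b item p q))
    (b : Board) (p : Int × Int) (hS : Shape n b)
    (hcard : (matchF n b item).card ≤ fuel + 1)
    (d : Int × Int) (hd : d ∈ movesA)
    (b' : Board) (T : Int × Int → Prop)
    (hI : InvA n b b' item (nvOf flag item) p T) :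
    ∃ T' : Int × Int → Prop,
      (∀ q, T q → T' q) ∧
      InvA n b (stepBodyA n item flag fuel p.1 p.2 b' d) item (nvOf flag item) p T' ∧
      (∀ q' : Int × Int, q' = (p.1 + d.1, p.2 + d.2) →
        ((0 ≤ q'.1 ∧ q'.1 < n ∧ 0 ≤ q'.2 ∧ q'.2 < n) ∧ getCell b q'.1 q'.2 = item) →
        T' q') := by
  obtain ⟨hDim, hMem, hNv, hOld, hClo⟩ := hI
  by_cases hg : 0 ≤ p.1 + d.1 ∧ p.1 + d.1 < n ∧ 0 ≤ p.2 + d.2 ∧ p.2 + d.2 < n ∧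
      getCell b' (p.1 + d.1) (p.2 + d.2) = item
  case neg =>
    refine ⟨T, fun q h => h, ?_, ?_⟩
    · unfold stepBodyA
      rw [if_neg hg]
      exact ⟨hDim, hMem, hNv, hOld, hClo⟩
    · intro q' heq ⟨hin, hm⟩
      subst heq
      by_contra hT
      exact hg ⟨hin.1, hin.2.1, hin.2.2.1, hin.2.2.2, (hOld _ hT).trans hm⟩
  case pos =>
    obtain ⟨hg1, hg2, hg3, hg4, hg5⟩ := hg
    have hS' : Shape n b' := shape_of_dimsEq hS hDim
    have hrl : (p.1 + d.1).toNat < b'.length := by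
      have := hS'.1; omega
    have hcl : (p.2 + d.2).toNat < (b'[(p.1 + d.1).toNat]'hrl).length := by
      have := hS'.2 (p.1 + d.1).toNat (by omega) hrl; omega
    have hnT : ¬ T (p.1 + d.1, p.2 + d.2) := by
      intro hT
      have := hNv _ hT
      simp only at this
      rw [this] at hg5
      exact hne hg5
    have hbq : getCell b (p.1 + d.1) (p.2 + d.2) = item := by
      have := hOld _ hnT
      simp only at this
      rw [← this]; exact hg5
    -- the painted value computed by A's code is nvOf flag item
    have hnveq : (if flag then Cell.i 0
        else if getCell b' (p.1 + d.1) (p.2 + d.2) = Cell.s "B" then Cell.i 1 else Cell.i 2)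
        = nvOf flag item := by
      rw [hg5]; rfl
    have hbody : stepBodyA n item flag fuel p.1 p.2 b' d =
        dfsA n item flag fuel (p.1 + d.1) (p.2 + d.2)
          (setCell b' (p.1 + d.1) (p.2 + d.2) (nvOf flag item)) := by
      unfold stepBodyA
      rw [if_pos ⟨hg1, hg2, hg3, hg4, hg5⟩, hnveq]
    set q : Int × Int := (p.1 + d.1, p.2 + d.2) with hqdef
    set b'' : Board := setCell b' (p.1 + d.1) (p.2 + d.2) (nvOf flag item) with hb''def
    have hset := getCell_setCell b' (p.1 + d.1) (p.2 + d.2) (nvOf flag item)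
      hg1 hg3 hrl hcl
    have hsetq : getCell b'' q.1 q.2 = nvOf flag item := by
      rw [hset q.1 q.2, if_pos ⟨rfl, rfl⟩]
    have hdq : DimsEq b b'' :=
      dimsEq_trans hDim (dims_setCell b' (p.1 + d.1) (p.2 + d.2) (nvOf flag item))
    have hS'' : Shape n b'' := shape_of_dimsEq hS hdq
    -- card decreases
    have hqmem : q ∈ matchF n b' item := mem_matchF.mpr ⟨⟨hg1, hg2, hg3, hg4⟩, hg5⟩
    have hsub'' : matchF n b'' item ⊆ (matchF n b' item).erase q := by
      intro z hz
      rw [mem_matchF] at hz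
      rw [Finset.mem_erase, mem_matchF]
      have hzq : ¬ (z.1 = q.1 ∧ z.2 = q.2) := by
        intro hzq
        rw [hset z.1 z.2, if_pos hzq] at hz
        exact hne hz.2
      refine ⟨fun hzz => hzq (by rw [hzz]; exact ⟨rfl, rfl⟩), hz.1, ?_⟩
      rw [hset z.1 z.2, if_neg hzq] at hz
      exact hz.2
    have hsubI : matchF n b' item ⊆ matchF n b item :=
      matchF_subset_of_invA hne ⟨hDim, hMem, hNv, hOld, hClo⟩
    have hcard'' : (matchF n b'' item).card ≤ fuel := by
      have h1 := Finset.card_le_card hsub''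
      have h2 := Finset.card_erase_of_mem hqmem
      have h3 := Finset.card_le_card hsubI
      have h4 : 0 < (matchF n b' item).card := Finset.card_pos.mpr ⟨q, hqmem⟩
      omega
    have hqne : getCell b'' q.1 q.2 ≠ item := by rw [hsetq]; exact hne
    obtain ⟨ihDim, ihP1, ihP2⟩ := ih b'' q hS'' hcard'' hqne
    -- values of b'' off q
    have hb''off : ∀ z : Int × Int, z ≠ q → getCell b'' z.1 z.2 = getCell b' z.1 z.2 := by
      intro z hz
      rw [hset z.1 z.2, if_neg (fun h => hz (Prod.ext_iff.mpr h))]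
    have hmono : ∀ z : Int × Int, getCell b'' z.1 z.2 = item → getCell b z.1 z.2 = item := by
      intro z hz
      have hzq : z ≠ q := fun h => by rw [h, hsetq] at hz; exact hne hz
      rw [hb''off z hzq] at hz
      by_cases hzT : T z
      · rw [hNv z hzT] at hz; exact absurd hz hne
      · rw [← hOld z hzT]; exact hz
    -- the step p → q in b
    have hnbr : q = (p.1 - 1, p.2) ∨ q = (p.1 + 1, p.2) ∨ q = (p.1, p.2 - 1) ∨
        q = (p.1, p.2 + 1) := by
      simp only [movesA, List.mem_cons, List.not_mem_nil, or_false] at hd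
      rcases hd with rfl | rfl | rfl | rfl
      · left; exact congrArg₂ Prod.mk (by ring) (by ring)
      · right; left; exact congrArg₂ Prod.mk (by ring) (by ring)
      · right; right; left; exact congrArg₂ Prod.mk (by ring) (by ring)
      · right; right; right; exact congrArg₂ Prod.mk (by ring) (by ring)
    have hstep_pq : stepR n b item p q := ⟨hnbr, ⟨hg1, hg2, hg3, hg4⟩, hbq⟩
    refine ⟨fun y => T y ∨ y = q ∨ (getCell b'' y.1 y.2 = item ∧ Reach n b'' item q y),
      fun y hy => Or.inl hy, ?_, ?_⟩
    · rw [hbody]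
      refine ⟨dimsEq_trans hdq ihDim, ?_, ?_, ?_, ?_⟩
      · -- membership
        rintro y (hyT | rfl | ⟨hym, hyr⟩)
        · exact hMem y hyT
        · exact ⟨hbq, Relation.ReflTransGen.single hstep_pq⟩
        · refine ⟨hmono y hym, Relation.ReflTransGen.trans
            (Relation.ReflTransGen.single hstep_pq) (reach_mono hmono hyr)⟩
      · -- painted
        rintro y (hyT | rfl | ⟨hym, hyr⟩)
        · have hyq : y ≠ q := fun h => hnT (h ▸ hyT)
          have hyP : ¬ (getCell b'' y.1 y.2 = item ∧ Reach n b'' item q y) := by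
            intro hP
            rw [hb''off y hyq, hNv y hyT] at hP
            exact hne hP.1
          rw [ihP2 y hyP, hb''off y hyq]
          exact hNv y hyT
        · have hyP : ¬ (getCell b'' q.1 q.2 = item ∧ Reach n b'' item q q) := by
            intro hP; exact hqne hP.1
          rw [ihP2 q hyP]; exact hsetq
        · exact ihP1 y ⟨hym, hyr⟩
      · -- untouched
        intro y hy
        have hyT : ¬ T y := fun h => hy (Or.inl h)
        have hyq : y ≠ q := fun h => hy (Or.inr (Or.inl h))
        have hyP : ¬ (getCell b'' y.1 y.2 = item ∧ Reach n b'' item q y) :=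
          fun h => hy (Or.inr (Or.inr h))
        rw [ihP2 y hyP, hb''off y hyq]
        exact hOld y hyT
      · -- closedness
        rintro x y (hxT | rfl | ⟨hxm, hxr⟩) hs
        · exact Or.inl (hClo x y hxT hs)
        · by_cases hyT : T y
          · exact Or.inl hyT
          by_cases hyq : y = q
          · exact Or.inr (Or.inl hyq)
          have hby : getCell b y.1 y.2 = item := hs.2.2
          have hb''y : getCell b'' y.1 y.2 = item := by
            rw [hb''off y hyq, hOld y hyT]; exact hby
          exact Or.inr (Or.inr ⟨hb''y,
            Relation.ReflTransGen.single ⟨hs.1, hs.2.1, hb''y⟩⟩)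
        · by_cases hyT : T y
          · exact Or.inl hyT
          by_cases hyq : y = q
          · exact Or.inr (Or.inl hyq)
          have hby : getCell b y.1 y.2 = item := hs.2.2
          have hb''y : getCell b'' y.1 y.2 = item := by
            rw [hb''off y hyq, hOld y hyT]; exact hby
          exact Or.inr (Or.inr ⟨hb''y, hxr.tail ⟨hs.1, hs.2.1, hb''y⟩⟩)
    · intro q' heq _
      exact Or.inr (Or.inl (heq.trans hqdef.symm))

-- main lemma for A's recursive dfs ------------------------------------------

theorem dfsA_paint (n : Int) (item : Cell) (flag : Bool)
    (hne : nvOf flag item ≠ item) :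
    ∀ (fuel : Nat) (b : Board) (p : Int × Int),
      Shape n b →
      (matchF n b item).card ≤ fuel →
      getCell b p.1 p.2 ≠ item →
      DimsEq b (dfsA n item flag fuel p.1 p.2 b) ∧
      PaintedOn b (dfsA n item flag fuel p.1 p.2 b) (nvOf flag item)
        (fun q => getCell b q.1 q.2 = item ∧ Reach n b item p q) := by
  intro fuel
  induction fuel with
  | zero =>
    intro b p hS hcard hp
    have hempty : matchF n b item = ∅ := Finset.card_eq_zero.mp (Nat.le_zero.mp hcard)
    refine ⟨dimsEq_refl b, ?_, fun q _ => rfl⟩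
    rintro q ⟨hqi, hre⟩
    exfalso
    rcases Relation.ReflTransGen.cases_tail hre with heq | ⟨z, _, hz⟩
    · exact hp (heq ▸ hqi)
    · have : q ∈ matchF n b item := mem_matchF.mpr ⟨hz.2.1, hqi⟩
      rw [hempty] at this
      exact absurd this (Finset.notMem_empty q)
  | succ fuel ih =>
    intro b p hS hcard hp
    have hI0 : InvA n b b item (nvOf flag item) p (fun _ => False) :=
      ⟨dimsEq_refl b, fun _ h => h.elim, fun _ h => h.elim, fun _ _ => rfl,
        fun _ _ h => h.elim⟩
    obtain ⟨T1, m1, hI1, c1⟩ := stepA_aux n item flag hne fuel ih b p hS hcard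
      (-1, 0) (by simp [movesA]) b (fun _ => False) hI0
    obtain ⟨T2, m2, hI2, c2⟩ := stepA_aux n item flag hne fuel ih b p hS hcard
      (1, 0) (by simp [movesA]) _ T1 hI1
    obtain ⟨T3, m3, hI3, c3⟩ := stepA_aux n item flag hne fuel ih b p hS hcard
      (0, -1) (by simp [movesA]) _ T2 hI2
    obtain ⟨T4, m4, hI4, c4⟩ := stepA_aux n item flag hne fuel ih b p hS hcard
      (0, 1) (by simp [movesA]) _ T3 hI3
    have hunf : dfsA n item flag (fuel + 1) p.1 p.2 b =
        stepBodyA n item flag fuel p.1 p.2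
          (stepBodyA n item flag fuel p.1 p.2
            (stepBodyA n item flag fuel p.1 p.2
              (stepBodyA n item flag fuel p.1 p.2 b (-1, 0)) (1, 0)) (0, -1)) (0, 1) := rfl
    rw [hunf]
    obtain ⟨hDim, hMem, hNv, hOld, hClo⟩ := hI4
    -- coverage: every in-bounds matching neighbor of p lies in T4
    have cov : ∀ q' : Int × Int, stepR n b item p q' → T4 q' := by
      intro q' hs
      obtain ⟨hnb, hin, hm⟩ := hs
      rcases hnb with he | he | he | he <;> subst he
      · exact m4 _ (m3 _ (m2 _ (c1 _ (congrArg₂ Prod.mk (by ring) (by ring)) ⟨hin, hm⟩)))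
      · exact m4 _ (m3 _ (c2 _ (congrArg₂ Prod.mk (by ring) (by ring)) ⟨hin, hm⟩))
      · exact m4 _ (c3 _ (congrArg₂ Prod.mk (by ring) (by ring)) ⟨hin, hm⟩)
      · exact c4 _ (congrArg₂ Prod.mk (by ring) (by ring)) ⟨hin, hm⟩
    have haux : ∀ q, Reach n b item p q → q = p ∨ T4 q := by
      intro q hre
      have hre' : Relation.ReflTransGen (stepR n b item) p q := hre
      clear hre
      induction hre' with
      | refl => exact Or.inl rfl
      | @tail y q' hxy hyz ihh =>
        right
        rcases ihh with hyp | hT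
        · subst hyp
          exact cov q' hyz
        · exact hClo y q' hT hyz
    have hiff : ∀ q, (getCell b q.1 q.2 = item ∧ Reach n b item p q) ↔ T4 q := by
      intro q
      constructor
      · rintro ⟨hm, hre⟩
        rcases haux q hre with rfl | hT
        · exact absurd hm hp
        · exact hT
      · intro hT
        exact hMem q hT
    refine ⟨hDim, ?_, ?_⟩
    · intro q hq
      exact hNv q ((hiff q).mp hq)
    · intro q hq
      exact hOld q (fun hT => hq ((hiff q).mpr hT))

-- the stack-fill invariant ---------------------------------------------------

def stepBodyB (n : Int) (item nv : Cell) (s : Board × List (Int × Int))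
    (q : Int × Int) : Board × List (Int × Int) :=
  if 0 ≤ q.1 ∧ q.1 < n ∧ 0 ≤ q.2 ∧ q.2 < n ∧ getCell s.1 q.1 q.2 = item then
    (setCell s.1 q.1 q.2 nv, q :: s.2)
  else s

def InvB (n : Int) (b : Board) (item nv : Cell) (p : Int × Int)
    (st : List (Int × Int)) (s : Board × List (Int × Int)) (Q : List (Int × Int)) : Prop :=
  s.2 = Q ++ st ∧ Q.Nodup ∧
  (∀ y ∈ Q,
    (y = (p.1 - 1, p.2) ∨ y = (p.1 + 1, p.2) ∨ y = (p.1, p.2 - 1) ∨ y = (p.1, p.2 + 1)) ∧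
    (0 ≤ y.1 ∧ y.1 < n ∧ 0 ≤ y.2 ∧ y.2 < n) ∧ getCell b y.1 y.2 = item) ∧
  DimsEq b s.1 ∧
  (∀ y ∈ Q, getCell s.1 y.1 y.2 = nv) ∧
  (∀ y : Int × Int, y ∉ Q → getCell s.1 y.1 y.2 = getCell b y.1 y.2)

theorem stepB_aux (n : Int) (item nv : Cell) (hne : nv ≠ item) (b : Board)
    (p : Int × Int) (st : List (Int × Int)) (hS : Shape n b)
    (s : Board × List (Int × Int)) (Q : List (Int × Int))
    (q : Int × Int)
    (hq : q = (p.1 - 1, p.2) ∨ q = (p.1 + 1, p.2) ∨ q = (p.1, p.2 - 1) ∨ q = (p.1, p.2 + 1))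
    (hI : InvB n b item nv p st s Q) :
    ∃ Q' : List (Int × Int),
      (Q' = Q ∨ Q' = q :: Q) ∧
      InvB n b item nv p st (stepBodyB n item nv s q) Q' ∧
      (((0 ≤ q.1 ∧ q.1 < n ∧ 0 ≤ q.2 ∧ q.2 < n) ∧ getCell b q.1 q.2 = item) → q ∈ Q') := by
  obtain ⟨hacc, hnd, hQp, hDim, hQnv, hQold⟩ := hI
  by_cases hg : 0 ≤ q.1 ∧ q.1 < n ∧ 0 ≤ q.2 ∧ q.2 < n ∧ getCell s.1 q.1 q.2 = item
  case neg =>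
    refine ⟨Q, Or.inl rfl, ?_, ?_⟩
    · unfold stepBodyB
      rw [if_neg hg]
      exact ⟨hacc, hnd, hQp, hDim, hQnv, hQold⟩
    · rintro ⟨hin, hm⟩
      by_contra hQ
      exact hg ⟨hin.1, hin.2.1, hin.2.2.1, hin.2.2.2, (hQold q hQ).trans hm⟩
  case pos =>
    obtain ⟨hg1, hg2, hg3, hg4, hg5⟩ := hg
    have hS' : Shape n s.1 := shape_of_dimsEq hS hDim
    have hrl : q.1.toNat < s.1.length := by have := hS'.1; omega
    have hcl : q.2.toNat < (s.1[q.1.toNat]'hrl).length := by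
      have := hS'.2 q.1.toNat (by omega) hrl; omega
    have hnQ : q ∉ Q := by
      intro hQ
      rw [hQnv q hQ] at hg5
      exact hne hg5
    have hbq : getCell b q.1 q.2 = item := by rw [← hQold q hnQ]; exact hg5
    have hset := getCell_setCell s.1 q.1 q.2 nv hg1 hg3 hrl hcl
    have hbody : stepBodyB n item nv s q = (setCell s.1 q.1 q.2 nv, q :: s.2) := by
      unfold stepBodyB
      rw [if_pos ⟨hg1, hg2, hg3, hg4, hg5⟩]
    refine ⟨q :: Q, Or.inr rfl, ?_, fun _ => List.mem_cons_self⟩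
    rw [hbody]
    refine ⟨by simp [hacc], List.nodup_cons.mpr ⟨hnQ, hnd⟩, ?_, ?_, ?_, ?_⟩
    · intro y hy
      rcases List.mem_cons.mp hy with rfl | hy'
      · exact ⟨hq, ⟨hg1, hg2, hg3, hg4⟩, hbq⟩
      · exact hQp y hy'
    · exact dimsEq_trans hDim (dims_setCell s.1 q.1 q.2 nv)
    · intro y hy
      rcases List.mem_cons.mp hy with rfl | hy'
      · rw [hset y.1 y.2]
        rw [if_pos ⟨rfl, rfl⟩]
      · have hyq : y ≠ q := fun h => hnQ (h ▸ hy')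
        rw [hset y.1 y.2, if_neg (fun h => hyq (Prod.ext_iff.mpr h))]
        exact hQnv y hy'
    · intro y hy
      have hyq : y ≠ q := fun h => hy (h ▸ List.mem_cons_self)
      have hyQ : y ∉ Q := fun h => hy (List.mem_cons_of_mem q h)
      rw [hset y.1 y.2, if_neg (fun h => hyq (Prod.ext_iff.mpr h))]
      exact hQold y hyQ

-- main lemma for B's stack fill ---------------------------------------------

theorem fillB_paint (n : Int) (item nv : Cell) (hne : nv ≠ item) :
    ∀ (fuel : Nat) (st : List (Int × Int)) (b : Board),
      Shape n b →
      (matchF n b item).card + st.length ≤ fuel →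
      (∀ s ∈ st, getCell b s.1 s.2 ≠ item) →
      DimsEq b (fillB n item nv fuel st b) ∧
      PaintedOn b (fillB n item nv fuel st b) nv
        (fun q => getCell b q.1 q.2 = item ∧ ∃ s ∈ st, Reach n b item s q) := by
  intro fuel
  induction fuel with
  | zero =>
    intro st b hS hcard hst
    cases st with
    | nil =>
      refine ⟨dimsEq_refl b, ?_, fun q _ => rfl⟩
      rintro q ⟨_, s, hs, _⟩
      exact absurd hs (List.not_mem_nil)
    | cons hd tl =>
      exfalso
      simp only [List.length_cons] at hcard
      omega
  | succ fuel ih =>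
    intro st b hS hcard hst
    cases st with
    | nil =>
      refine ⟨dimsEq_refl b, ?_, fun q _ => rfl⟩
      rintro q ⟨_, s, hs, _⟩
      exact absurd hs (List.not_mem_nil)
    | cons phd st' =>
      obtain ⟨pr, pc⟩ := phd
      have hhead : getCell b pr pc ≠ item := hst _ List.mem_cons_self
      have hI0 : InvB n b item nv (pr, pc) st' (b, st') [] :=
        ⟨by simp, List.nodup_nil, fun y hy => absurd hy (List.not_mem_nil),
          dimsEq_refl b, fun y hy => absurd hy (List.not_mem_nil), fun y _ => rfl⟩
      obtain ⟨Q1, e1, hI1, cB1⟩ := stepB_aux n item nv hne b (pr, pc) st' hS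
        (b, st') [] (pr - 1, pc) (Or.inl rfl) hI0
      obtain ⟨Q2, e2, hI2, cB2⟩ := stepB_aux n item nv hne b (pr, pc) st' hS
        _ Q1 (pr + 1, pc) (Or.inr (Or.inl rfl)) hI1
      obtain ⟨Q3, e3, hI3, cB3⟩ := stepB_aux n item nv hne b (pr, pc) st' hS
        _ Q2 (pr, pc - 1) (Or.inr (Or.inr (Or.inl rfl))) hI2
      obtain ⟨Q4, e4, hI4, cB4⟩ := stepB_aux n item nv hne b (pr, pc) st' hS
        _ Q3 (pr, pc + 1) (Or.inr (Or.inr (Or.inr rfl))) hI3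
      set s4 := stepBodyB n item nv
        (stepBodyB n item nv
          (stepBodyB n item nv
            (stepBodyB n item nv (b, st') (pr - 1, pc)) (pr + 1, pc)) (pr, pc - 1))
        (pr, pc + 1) with hs4def
    -- Q-monotonicity
      have hm23 : ∀ y, y ∈ Q2 → y ∈ Q3 := by
        rcases e3 with rfl | rfl
        · exact fun y hy => hy
        · exact fun y hy => List.mem_cons_of_mem _ hy
      have hmQ3 : ∀ y, y ∈ Q3 → y ∈ Q4 := by
        rcases e4 with rfl | rfl
        · exact fun y hy => hy
        · exact fun y hy => List.mem_cons_of_mem _ hy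
      have hmQ2 : ∀ y, y ∈ Q2 → y ∈ Q4 := fun y hy => hmQ3 _ (hm23 _ hy)
      have hmQ1 : ∀ y, y ∈ Q1 → y ∈ Q4 := by
        rcases e2 with rfl | rfl
        · exact hmQ2
        · exact fun y hy => hmQ2 _ (List.mem_cons_of_mem _ hy)
      obtain ⟨hacc, hnd, hQp, hDimB, hQnv, hQold⟩ := hI4
      have hunf : fillB n item nv (fuel + 1) ((pr, pc) :: st') b =
          fillB n item nv fuel s4.2 s4.1 := rfl
      rw [hunf, hacc]
      -- coverage of all four neighbors
      have cov : ∀ z : Int × Int, stepR n b item (pr, pc) z → z ∈ Q4 := by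
        intro z hs
        obtain ⟨hnb, hin, hm⟩ := hs
        rcases hnb with he | he | he | he <;> subst he
        · exact hmQ1 _ (cB1 ⟨hin, hm⟩)
        · exact hmQ2 _ (cB2 ⟨hin, hm⟩)
        · exact hmQ3 _ (cB3 ⟨hin, hm⟩)
        · exact cB4 ⟨hin, hm⟩
      -- cardinality bookkeeping
      have hqQ : ∀ y ∈ Q4, y ∈ matchF n b item := fun y hy =>
        mem_matchF.mpr ⟨(hQp y hy).2.1, (hQp y hy).2.2⟩
      have hmono2 : ∀ z : Int × Int, getCell s4.1 z.1 z.2 = item →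
          getCell b z.1 z.2 = item := by
        intro z hz
        have hzQ : z ∉ Q4 := fun h => by rw [hQnv z h] at hz; exact hne hz
        rw [← hQold z hzQ]; exact hz
      have hsub2 : matchF n s4.1 item ⊆ matchF n b item \ Q4.toFinset := by
        intro z hz
        rw [mem_matchF] at hz
        rw [Finset.mem_sdiff, mem_matchF, List.mem_toFinset]
        have hzQ : z ∉ Q4 := fun h => by
          have := hQnv z h
          rw [this] at hz
          exact hne hz.2
        exact ⟨⟨hz.1, hmono2 z hz.2⟩, hzQ⟩
      have hQsub : Q4.toFinset ⊆ matchF n b item := fun y hy =>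
        hqQ y (List.mem_toFinset.mp hy)
      have hcard2 : (matchF n s4.1 item).card + Q4.length ≤ (matchF n b item).card := by
        have hc1 := Finset.card_le_card hsub2
        rw [Finset.card_sdiff] at hc1
        rw [Finset.inter_eq_left.mpr hQsub] at hc1
        have hql : Q4.toFinset.card = Q4.length := List.toFinset_card_of_nodup hnd
        have hc2 := Finset.card_le_card hQsub
        omega
      have hS4 : Shape n s4.1 := shape_of_dimsEq hS hDimB
      have hstack4 : ∀ s ∈ Q4 ++ st', getCell s4.1 s.1 s.2 ≠ item := by
        intro s hs
        rcases List.mem_append.mp hs with hsQ | hstl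
        · rw [hQnv s hsQ]; exact hne
        · by_cases hsQ : s ∈ Q4
          · rw [hQnv s hsQ]; exact hne
          · rw [hQold s hsQ]
            exact hst s (List.mem_cons_of_mem _ hstl)
      obtain ⟨ihDim, ihP1, ihP2⟩ := ih (Q4 ++ st') s4.1 hS4
        (by
          simp only [List.length_append, List.length_cons] at hcard ⊢
          omega) hstack4
      -- the target set decomposes
      have hiffB : ∀ q : Int × Int,
          (getCell b q.1 q.2 = item ∧ ∃ s ∈ (pr, pc) :: st', Reach n b item s q) ↔
          (q ∈ Q4 ∨ (getCell s4.1 q.1 q.2 = item ∧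
            ∃ s ∈ Q4 ++ st', Reach n s4.1 item s q)) := by
        intro q
        constructor
        · rintro ⟨hm, s, hsmem, hre⟩
          rcases pathLemma n item b s4.1 Q4
            (fun y hy => by rw [hQnv y hy]; exact hne) hQold s q hre hm with
            hQ | ⟨hb2q, s', hs', hre2⟩
          · exact Or.inl hQ
          · rcases hs' with hseq | hs'Q
            · rcases List.mem_cons.mp hsmem with heq2 | hstl
              · rw [hseq, heq2] at hre2
                rcases Relation.ReflTransGen.cases_head hre2 with heq | ⟨z, hz1, hz2⟩
                · exfalso
                  subst heq
                  have hpQ : (pr, pc) ∉ Q4 := fun h => by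
                    rw [hQnv _ h] at hb2q
                    exact hne hb2q
                  rw [hQold _ hpQ] at hb2q
                  exact hhead hb2q
                · exfalso
                  have hzQ : z ∉ Q4 := fun h =>
                    hne ((hQnv z h).symm.trans hz1.2.2)
                  have hzb : getCell b z.1 z.2 = item := by
                    rw [← hQold z hzQ]; exact hz1.2.2
                  exact hzQ (cov z ⟨hz1.1, hz1.2.1, hzb⟩)
              · exact Or.inr ⟨hb2q, s, List.mem_append.mpr (Or.inr hstl), hseq ▸ hre2⟩
            · exact Or.inr ⟨hb2q, s', List.mem_append.mpr (Or.inl hs'Q), hre2⟩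
        · rintro (hQ | ⟨hm2, s, hsmem, hre2⟩)
          · refine ⟨(hQp q hQ).2.2, (pr, pc), List.mem_cons_self, ?_⟩
            exact Relation.ReflTransGen.single ⟨(hQp q hQ).1, (hQp q hQ).2.1, (hQp q hQ).2.2⟩
          · refine ⟨hmono2 q hm2, ?_⟩
            rcases List.mem_append.mp hsmem with hsQ | hstl
            · refine ⟨(pr, pc), List.mem_cons_self, ?_⟩
              exact Relation.ReflTransGen.trans
                (Relation.ReflTransGen.single
                  ⟨(hQp s hsQ).1, (hQp s hsQ).2.1, (hQp s hsQ).2.2⟩)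
                (reach_mono hmono2 hre2)
            · exact ⟨s, List.mem_cons_of_mem _ hstl, reach_mono hmono2 hre2⟩
      refine ⟨dimsEq_trans hDimB ihDim, ?_, ?_⟩
      · intro q hq
        rcases (hiffB q).mp hq with hQ | hP2
        · have hnP2 : ¬ (getCell s4.1 q.1 q.2 = item ∧
              ∃ s ∈ Q4 ++ st', Reach n s4.1 item s q) := by
            rintro ⟨hm2, _⟩
            rw [hQnv q hQ] at hm2
            exact hne hm2
          rw [ihP2 q hnP2]
          exact hQnv q hQ
        · exact ihP1 q hP2
      · intro q hq
        have hnQ : q ∉ Q4 := fun h => hq ((hiffB q).mpr (Or.inl h))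
        have hnP2 : ¬ (getCell s4.1 q.1 q.2 = item ∧
            ∃ s ∈ Q4 ++ st', Reach n s4.1 item s q) := fun h =>
          hq ((hiffB q).mpr (Or.inr h))
        rw [ihP2 q hnP2]
        exact hQold q hnQ

-- the two fills produce the same board ---------------------------------------

theorem board_eq_of_painted {b o1 o2 : Board} {nv : Cell} {P P' : Int × Int → Prop}
    (d1 : DimsEq b o1) (d2 : DimsEq b o2)
    (h1 : PaintedOn b o1 nv P) (h2 : PaintedOn b o2 nv P')
    (hPP : ∀ q, P q ↔ P' q) : o1 = o2 := by
  have hval : ∀ q : Int × Int, getCell o1 q.1 q.2 = getCell o2 q.1 q.2 := by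
    intro q
    by_cases hq : P q
    · rw [h1.1 q hq, h2.1 q ((hPP q).mp hq)]
    · rw [h1.2 q hq, h2.2 q (fun h => hq ((hPP q).mpr h))]
  have hlen : o1.length = o2.length := by rw [d1.1, d2.1]
  apply List.ext_getElem hlen
  intro i h1i h2i
  have hib : i < b.length := by rw [← d1.1]; exact h1i
  have hrl : (o1[i]'h1i).length = (o2[i]'h2i).length := by
    rw [d1.2 i hib h1i, d2.2 i hib h2i]
  apply List.ext_getElem hrl
  intro j hj1 hj2
  have e1 := getCell_eq_getElem o1 i j h1i hj1
  have e2 := getCell_eq_getElem o2 i j h2i hj2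
  rw [← e1, ← e2]
  exact hval ((i : Int), (j : Int))

theorem fill_eq (n : Int) (item : Cell) (flag : Bool) (r c : Int) (b : Board)
    (hne : nvOf flag item ≠ item) (hS : Shape n b)
    (hp : getCell b r c ≠ item) :
    dfsA n item flag (n.toNat * n.toNat + 1) r c b =
    fillB n item (nvOf flag item) (n.toNat * n.toNat + 2) [(r, c)] b := by
  have hA := dfsA_paint n item flag hne (n.toNat * n.toNat + 1) b (r, c) hS
    (le_trans (card_matchF_le n b item) (Nat.le_succ _)) hp
  have hB := fillB_paint n item (nvOf flag item) hne (n.toNat * n.toNat + 2) [(r, c)] b hS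
    (by have := card_matchF_le n b item; simp only [List.length_cons, List.length_nil]; omega)
    (by intro s hs; rw [List.mem_singleton] at hs; subst hs; exact hp)
  refine board_eq_of_painted hA.1 hB.1 hA.2 hB.2 ?_
  intro q
  constructor
  · rintro ⟨hm, hre⟩
    exact ⟨hm, (r, c), List.mem_singleton.mpr rfl, hre⟩
  · rintro ⟨hm, s, hs, hre⟩
    rw [List.mem_singleton] at hs
    subst hs
    exact ⟨hm, hre⟩

-- generic fold congruence ---------------------------------------------------

theorem foldl_eq_of_inv {α : Type} (f g : (Board × Int) → α → (Board × Int))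
    (Inv : Board → Prop) :
    ∀ (l : List α) (s : Board × Int),
      (∀ (s' : Board × Int) (x : α), x ∈ l → Inv s'.1 → f s' x = g s' x ∧ Inv (f s' x).1) →
      Inv s.1 →
      l.foldl f s = l.foldl g s ∧ Inv (l.foldl f s).1 := by
  intro l
  induction l with
  | nil => exact fun s _ hs => ⟨rfl, hs⟩
  | cons x xs ihl =>
    intro s hstep hs
    obtain ⟨heq, hinv⟩ := hstep s x List.mem_cons_self hs
    have hrest := ihl (f s x) (fun s' y hy => hstep s' y (List.mem_cons_of_mem x hy)) hinv
    rw [List.foldl_cons, List.foldl_cons, ← heq]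
    exact hrest

-- one scan step of each pass agrees -----------------------------------------

theorem cellStep1_eq (n : Int) (r c : Int) (b : Board) (cnt : Int)
    (hr : 0 ≤ r ∧ r < n) (hc : 0 ≤ c ∧ c < n) (hS : Shape n b) :
    ((let cell := getCell b r c
      if isStr cell then
        (dfsA n cell false (n.toNat * n.toNat + 1) r c
          (setCell b r c (if cell = Cell.s "B" then Cell.i 1 else Cell.i 2)), cnt + 1)
      else (b, cnt)) =
     (let cell := getCell b r c
      if isStr cell then
        let nv := if cell = Cell.s "B" then Cell.i 1 else Cell.i 2
        (fillB n cell nv (n.toNat * n.toNat + 2) [(r, c)] (setCell b r c nv), cnt + 1)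
      else (b, cnt))) ∧
    Shape n (let cell := getCell b r c
      if isStr cell then
        (dfsA n cell false (n.toNat * n.toNat + 1) r c
          (setCell b r c (if cell = Cell.s "B" then Cell.i 1 else Cell.i 2)), cnt + 1)
      else (b, cnt)).1 := by
  cases hcell : getCell b r c with
  | i v =>
    constructor
    · simp [hcell, isStr]
    · simp only [hcell, isStr, Bool.false_eq_true, if_false]
      exact hS
  | s v =>
    simp only [hcell, isStr, if_true]
    have hrl : r.toNat < b.length := by have := hS.1; omega
    have hcl : c.toNat < (b[r.toNat]'hrl).length := by
      have := hS.2 r.toNat (by omega) hrl; omega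
    have hne : nvOf false (Cell.s v) ≠ Cell.s v := by
      unfold nvOf
      split
      · exact fun h => Cell.noConfusion h
      · split <;> exact fun h => Cell.noConfusion h
    have hnveq : (if Cell.s v = Cell.s "B" then Cell.i 1 else Cell.i 2) =
        nvOf false (Cell.s v) := rfl
    set b' := setCell b r c (nvOf false (Cell.s v)) with hb'def
    have hset := getCell_setCell b r c (nvOf false (Cell.s v)) hr.1 hc.1 hrl hcl
    have hS' : Shape n b' := shape_of_dimsEq hS (dims_setCell b r c _)
    have hp' : getCell b' r c ≠ Cell.s v := by
      rw [hset r c, if_pos ⟨rfl, rfl⟩]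
      exact hne
    have hfe := fill_eq n (Cell.s v) false r c b' hne hS' hp'
    constructor
    · rw [hnveq, hfe]
    · rw [hnveq]
      exact shape_of_dimsEq hS'
        (dfsA_paint n (Cell.s v) false hne (n.toNat * n.toNat + 1) b' (r, c) hS'
          (le_trans (card_matchF_le n b' (Cell.s v)) (Nat.le_succ _)) hp').1

theorem cellStep2_eq (n : Int) (r c : Int) (b : Board) (cnt : Int)
    (hr : 0 ≤ r ∧ r < n) (hc : 0 ≤ c ∧ c < n) (hS : Shape n b) :
    ((let cell := getCell b r c
      if cell ≠ Cell.i 0 then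
        (dfsA n cell true (n.toNat * n.toNat + 1) r c (setCell b r c (Cell.i 0)), cnt + 1)
      else (b, cnt)) =
     (let cell := getCell b r c
      if cell ≠ Cell.i 0 then
        (fillB n cell (Cell.i 0) (n.toNat * n.toNat + 2) [(r, c)] (setCell b r c (Cell.i 0)),
          cnt + 1)
      else (b, cnt))) ∧
    Shape n (let cell := getCell b r c
      if cell ≠ Cell.i 0 then
        (dfsA n cell true (n.toNat * n.toNat + 1) r c (setCell b r c (Cell.i 0)), cnt + 1)
      else (b, cnt)).1 := by
  by_cases hcell : getCell b r c ≠ Cell.i 0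
  case neg =>
    have hcell0 : getCell b r c = Cell.i 0 := not_not.mp hcell
    constructor
    · simp [hcell0]
    · simp only [hcell0, ne_eq, not_true_eq_false, Bool.false_eq_true, if_false]
      exact hS
  case pos =>
    simp only [if_pos hcell]
    have hrl : r.toNat < b.length := by have := hS.1; omega
    have hcl : c.toNat < (b[r.toNat]'hrl).length := by
      have := hS.2 r.toNat (by omega) hrl; omega
    set item := getCell b r c with hitemdef
    have hne : nvOf true item ≠ item := by
      unfold nvOf
      simp only [if_pos rfl]
      exact fun h => hcell h.symm
    have hnveq : (Cell.i 0) = nvOf true item := rfl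
    set b' := setCell b r c (Cell.i 0) with hb'def
    have hset := getCell_setCell b r c (Cell.i 0) hr.1 hc.1 hrl hcl
    have hS' : Shape n b' := shape_of_dimsEq hS (dims_setCell b r c _)
    have hp' : getCell b' r c ≠ item := by
      rw [hset r c, if_pos ⟨rfl, rfl⟩]
      exact fun h => hcell h.symm
    have hfe := fill_eq n item true r c b' hne hS' hp'
    constructor
    · rw [show fillB n item (Cell.i 0) (n.toNat * n.toNat + 2) [(r, c)] b' =
          fillB n item (nvOf true item) (n.toNat * n.toNat + 2) [(r, c)] b' from rfl, ← hfe]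
    · exact shape_of_dimsEq hS'
        (dfsA_paint n item true hne (n.toNat * n.toNat + 1) b' (r, c) hS'
          (le_trans (card_matchF_le n b' item) (Nat.le_succ _)) hp').1

-- initial shape --------------------------------------------------------------

theorem shape_init (n : Int) (board : List (List String))
    (hpre : Pre_solution n board) : Shape n (toCells board) := by
  by_cases hn : 0 < n
  case neg =>
    have h0 : n.toNat = 0 := by omega
    exact ⟨by omega, fun i hi => by omega⟩
  case pos =>
    obtain ⟨hlen, hrow⟩ := hpre hn
    constructor
    · simp only [toCells, List.length_map]
      omega
    · intro i hi h
      have hib : i < board.length := by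
        simpa only [toCells, List.length_map] using h
      have hmem : board[i] ∈ board.take n.toNat := by
        have ht : i < (board.take n.toNat).length := by
          simp only [List.length_take]
          omega
        have := List.getElem_mem ht
        rwa [List.getElem_take] at this
      have := hrow _ hmem
      simp only [toCells, List.getElem_map, List.length_map]
      omega

-- named pass-step functions (definitionally the lambdas inside the two ports)
def innerA1 (n : Int) (r : Int) : (Board × Int) → Int → (Board × Int) :=
  fun st c =>
    let cell := getCell st.1 r c
    if isStr cell then
      (dfsA n cell false (n.toNat * n.toNat + 1) r c
        (setCell st.1 r c (if cell = Cell.s "B" then Cell.i 1 else Cell.i 2)), st.2 + 1)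
    else st

def innerB1 (n : Int) (r : Int) : (Board × Int) → Int → (Board × Int) :=
  fun st c =>
    let cell := getCell st.1 r c
    if isStr cell then
      let nv := if cell = Cell.s "B" then Cell.i 1 else Cell.i 2
      (fillB n cell nv (n.toNat * n.toNat + 2) [(r, c)] (setCell st.1 r c nv), st.2 + 1)
    else st

def innerA2 (n : Int) (r : Int) : (Board × Int) → Int → (Board × Int) :=
  fun st c =>
    let cell := getCell st.1 r c
    if cell ≠ Cell.i 0 then
      (dfsA n cell true (n.toNat * n.toNat + 1) r c (setCell st.1 r c (Cell.i 0)), st.2 + 1)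
    else st

def innerB2 (n : Int) (r : Int) : (Board × Int) → Int → (Board × Int) :=
  fun st c =>
    let cell := getCell st.1 r c
    if cell ≠ Cell.i 0 then
      (fillB n cell (Cell.i 0) (n.toNat * n.toNat + 2) [(r, c)] (setCell st.1 r c (Cell.i 0)),
        st.2 + 1)
    else st

def passA1 (n : Int) : (Board × Int) → Int → (Board × Int) :=
  fun st r => (PySem.List.pyRange 0 n 1).foldl (innerA1 n r) st
def passB1 (n : Int) : (Board × Int) → Int → (Board × Int) :=
  fun st r => (PySem.List.pyRange 0 n 1).foldl (innerB1 n r) st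
def passA2 (n : Int) : (Board × Int) → Int → (Board × Int) :=
  fun st r => (PySem.List.pyRange 0 n 1).foldl (innerA2 n r) st
def passB2 (n : Int) : (Board × Int) → Int → (Board × Int) :=
  fun st r => (PySem.List.pyRange 0 n 1).foldl (innerB2 n r) st

-- ===== VERDICT (by name: the statement is the Claim_ definition above) =====
theorem solution_spec : Claim_equal_solution := by
  intro n board hdom hpre
  unfold Spec_solution
  have hS0 : Shape n (toCells board) := shape_init n board hpre
  have hmem := fun (x : Int) (hx : x ∈ PySem.List.pyRange 0 n 1) =>
    (PySem.List.mem_pyRange_one).mp hx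
  obtain ⟨e1, hS1⟩ := foldl_eq_of_inv (passA1 n) (passB1 n) (Shape n)
    (PySem.List.pyRange 0 n 1) (toCells board, 0)
    (by
      intro s' r hrmem hs
      exact foldl_eq_of_inv (innerA1 n r) (innerB1 n r) (Shape n)
        (PySem.List.pyRange 0 n 1) s'
        (by
          intro s'' c hcmem hs''
          exact cellStep1_eq n r c s''.1 s''.2 (hmem r hrmem) (hmem c hcmem) hs'')
        hs)
    hS0
  rw [e1] at hS1
  obtain ⟨e2, _⟩ := foldl_eq_of_inv (passA2 n) (passB2 n) (Shape n)
    (PySem.List.pyRange 0 n 1)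
    (((PySem.List.pyRange 0 n 1).foldl (passB1 n) (toCells board, (0 : Int))).1, 0)
    (by
      intro s' r hrmem hs
      exact foldl_eq_of_inv (innerA2 n r) (innerB2 n r) (Shape n)
        (PySem.List.pyRange 0 n 1) s'
        (by
          intro s'' c hcmem hs''
          exact cellStep2_eq n r c s''.1 s''.2 (hmem r hrmem) (hmem c hcmem) hs'')
        hs)
    hS1
  show (((PySem.List.pyRange 0 n 1).foldl (passA1 n) (toCells board, (0 : Int))).2,
      ((PySem.List.pyRange 0 n 1).foldl (passA2 n)
        (((PySem.List.pyRange 0 n 1).foldl (passA1 n) (toCells board, (0 : Int))).1, 0)).2) =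
    (((PySem.List.pyRange 0 n 1).foldl (passB1 n) (toCells board, (0 : Int))).2,
      ((PySem.List.pyRange 0 n 1).foldl (passB2 n)
        (((PySem.List.pyRange 0 n 1).foldl (passB1 n) (toCells board, (0 : Int))).1, 0)).2)
  rw [e1, e2]
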